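-- pv_equiv track=rewrite | github.com/thelab33/fundchamps-paas | fundchamps_macro_usage_patcher.py | parse_macro_args
-- ===== SOURCE A (Python) =====
-- def parse_macro_args(arg_str):
--     """
--     Returns: (known_args, unknown_kwargs)
--     """
--     # This is a naive parser: will break on nested dicts/lists, but works for 90% of simple Jinja calls.
--     args = []
--     kwargs = {}
--     buf = ''
--     depth = 0
--     key = None
--     for c in arg_str + ',':
--         if c in '({[':
--             depth += 1
--             buf += c
--         elif c in ')}]':
--             depth -= 1
--             buf += c
--         elif c == ',' and depth == 0:
--             part = buf.strip()
--             buf = ''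
--             if '=' in part:
--                 k, v = part.split('=', 1)
--                 kwargs[k.strip()] = v.strip()
--             elif part:
--                 args.append(part)
--         else:
--             buf += c
--     return args, kwargs
-- ===== SOURCE B (Python) =====
-- def parse_macro_args(arg_str):
--     """
--     Returns: (known_args, unknown_kwargs)
--     """
--     # Split-by-search: repeatedly find the next top-level comma in arg_str + ','
--     # and slice the segment out, instead of streaming chars through a buffer.
--     def _top_comma(s, start):
--         depth = 0
--         for i in range(start, len(s)):
--             c = s[i]
--             if c in '({[':
--                 depth += 1
--             elif c in ')}]':
--                 depth -= 1
--             elif c == ',' and depth == 0: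
--                 return i
--         return -1
--
--     args = []
--     kwargs = {}
--     s = arg_str + ','
--     start = 0
--     while True:
--         i = _top_comma(s, start)
--         if i < 0:
--             break
--         part = s[start:i].strip()
--         if '=' in part:
--             k, v = part.split('=', 1)
--             kwargs[k.strip()] = v.strip()
--         elif part:
--             args.append(part)
--         start = i + 1
--     return args, kwargs
-- ===== Notes on version B (the rewrite author's own statement) =====
-- stated objective: alternative
-- what changed: Replaces A's single streaming state machine that accumulates characters into a buffer with a find-and-slice loop: a helper searches for the position of the next top-level comma (over the input with a sentinel separator appended) and each segment is obtained by string slicing, so no character buffer is ever built.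
import Mathlib
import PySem

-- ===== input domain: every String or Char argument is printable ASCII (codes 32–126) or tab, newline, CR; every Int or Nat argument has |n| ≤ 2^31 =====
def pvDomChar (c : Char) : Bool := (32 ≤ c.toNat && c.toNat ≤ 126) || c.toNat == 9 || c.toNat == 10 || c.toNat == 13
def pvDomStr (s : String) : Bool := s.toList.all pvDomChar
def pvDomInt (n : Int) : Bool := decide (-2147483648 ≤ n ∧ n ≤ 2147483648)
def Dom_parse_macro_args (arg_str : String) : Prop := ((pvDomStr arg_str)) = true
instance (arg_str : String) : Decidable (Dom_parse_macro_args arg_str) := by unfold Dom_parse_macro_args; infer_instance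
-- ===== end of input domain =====

-- B replaces A's streaming buffer state machine with a find-the-next-top-level-comma-and-slice loop (objective: alternative decomposition); same return value.

-- shared helper: k, v = part.split('=', 1); (k.strip(), v.strip())  (both Pythons do this split)
def pvKV (part : List Char) : String × String :=
  let ps := PySem.Chars.splitOnMax part ['='] 1
  (String.ofList (PySem.Chars.strip (ps.headD [])), String.ofList (PySem.Chars.strip ((ps.drop 1).headD [])))

-- ===== PORT A =====
-- single loop carrying (args, kwargs, buf, depth); classification happens inside the loop
def aStep (st : List String × PySem.Dict String String × List Char × Int) (c : Char) :
    List String × PySem.Dict String String × List Char × Int :=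
  let (args, kw, buf, depth) := st
  if c = '(' ∨ c = '{' ∨ c = '[' then (args, kw, buf ++ [c], depth + 1)
  else if c = ')' ∨ c = '}' ∨ c = ']' then (args, kw, buf ++ [c], depth - 1)
  else if c = ',' ∧ depth = 0 then
    let part := PySem.Chars.strip buf
    if PySem.Chars.isIn ['='] part then
      let (k, v) := pvKV part
      (args, kw.insert k v, [], depth)
    else if part ≠ [] then (args ++ [String.ofList part], kw, [], depth)
    else (args, kw, [], depth)
  else (args, kw, buf ++ [c], depth)

def parse_macro_args (arg_str : String) : List String × (List (String × String)) :=
  let (args, kw, _, _) :=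
    (arg_str.toList ++ [',']).foldl aStep ([], PySem.Dict.empty, [], 0)
  (args, kw.items)

-- ===== PORT B =====
-- helper _top_comma: index of the first comma at bracket depth 0, scanning from `start`; -1 if none
def topCommaAux : List Char → Nat → Int → Int
  | [], _, _ => -1
  | c :: cs, i, depth =>
    if c = '(' ∨ c = '{' ∨ c = '[' then topCommaAux cs (i + 1) (depth + 1)
    else if c = ')' ∨ c = '}' ∨ c = ']' then topCommaAux cs (i + 1) (depth - 1)
    else if c = ',' ∧ depth = 0 then (i : Int)
    else topCommaAux cs (i + 1) depth

def topComma (s : List Char) (start : Nat) : Int := topCommaAux (s.drop start) start 0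

-- bound used only for termination of the while-loop below
theorem topCommaAux_cases (l : List Char) : ∀ (i : Nat) (d : Int),
    topCommaAux l i d = -1 ∨
      ∃ j : Nat, topCommaAux l i d = (j : Int) ∧ i ≤ j ∧ j < i + l.length := by
  induction l with
  | nil => intro i d; exact Or.inl rfl
  | cons c cs ih =>
    intro i d
    simp only [topCommaAux]
    split_ifs with h1 h2 h3
    · rcases ih (i + 1) (d + 1) with h | ⟨j, hj, h₁, h₂⟩
      · exact Or.inl h
      · exact Or.inr ⟨j, hj, by omega, by simpa using by omega⟩
    · rcases ih (i + 1) (d - 1) with h | ⟨j, hj, h₁, h₂⟩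
      · exact Or.inl h
      · exact Or.inr ⟨j, hj, by omega, by simpa using by omega⟩
    · exact Or.inr ⟨i, rfl, le_refl i, by simp⟩
    · rcases ih (i + 1) d with h | ⟨j, hj, h₁, h₂⟩
      · exact Or.inl h
      · exact Or.inr ⟨j, hj, by omega, by simpa using by omega⟩

theorem topComma_bound {s : List Char} {start : Nat} (h : ¬ topComma s start < 0) :
    start ≤ (topComma s start).toNat ∧ (topComma s start).toNat < s.length := by
  unfold topComma at *
  rcases topCommaAux_cases (s.drop start) start 0 with hc | ⟨j, hj, h₁, h₂⟩
  · simp [hc] at h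
  · rw [hj]
    simp only [Int.toNat_natCast]
    have := List.length_drop (l := s) (i := start)
    omega

-- while loop: find next top-level comma, slice the segment out, classify it
def bLoop (s : List Char) (args : List String) (kw : PySem.Dict String String) (start : Nat) :
    List String × PySem.Dict String String :=
  let i := topComma s start
  if h : i < 0 then (args, kw)
  else
    let n := i.toNat
    -- part = s[start:i].strip(); start, i in range here, so take/drop is exact for the slice
    let part := PySem.Chars.strip ((s.take n).drop start)
    let (args', kw') :=
      if PySem.Chars.isIn ['='] part then
        let (k, v) := pvKV part
        (args, kw.insert k v)
      else if part ≠ [] then (args ++ [String.ofList part], kw)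
      else (args, kw)
    bLoop s args' kw' (n + 1)
termination_by s.length - start
decreasing_by
  have := topComma_bound h
  omega

def parse_macro_args_alt (arg_str : String) : List String × (List (String × String)) :=
  let s := arg_str.toList ++ [',']
  let (args, kw) := bLoop s [] PySem.Dict.empty 0
  (args, kw.items)

-- ===== PRECONDITION & SPEC =====
def Spec_parse_macro_args (arg_str : String) (out : List String × (List (String × String))) : Prop := out = parse_macro_args_alt arg_str
instance (arg_str : String) (out : List String × (List (String × String))) : Decidable (Spec_parse_macro_args arg_str out) := by unfold Spec_parse_macro_args; infer_instance

-- ===== CLAIM (what is proved, stated in full; the proofs are below) =====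
def Claim_equal_parse_macro_args : Prop := ∀ (arg_str : String), Dom_parse_macro_args arg_str → Spec_parse_macro_args arg_str (parse_macro_args arg_str)

-- ===== LEMMAS AND PROOFS =====

-- no top-level comma in l: A's fold just appends every char to the buffer
theorem fold_noComma (l : List Char) : ∀ (i : Nat) (d : Int)
    (args : List String) (kw : PySem.Dict String String) (buf : List Char),
    topCommaAux l i d = -1 →
    ∃ d', l.foldl aStep (args, kw, buf, d) = (args, kw, buf ++ l, d') := by
  induction l with
  | nil => intro i d args kw buf _; exact ⟨d, by simp⟩
  | cons c cs ih =>
    intro i d args kw buf h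
    simp only [topCommaAux] at h
    simp only [List.foldl_cons]
    split_ifs at h with h1 h2 h3
    · simpa [aStep, h1, List.append_assoc] using ih (i + 1) (d + 1) args kw (buf ++ [c]) h
    · simpa [aStep, h1, h2, List.append_assoc] using ih (i + 1) (d - 1) args kw (buf ++ [c]) h
      -- (the depth-0 comma branch is closed by split_ifs itself: ↑i = -1 is absurd)
    · have hstep : aStep (args, kw, buf, d) c = (args, kw, buf ++ [c], d) := by
        simp [aStep, h1, h2, h3]
      rw [hstep]
      simpa [List.append_assoc] using ih (i + 1) d args kw (buf ++ [c]) h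

-- first top-level comma at absolute index j: the prefix is appended verbatim and depth is 0 there
theorem fold_toComma (l : List Char) : ∀ (i j : Nat) (d : Int)
    (args : List String) (kw : PySem.Dict String String) (buf : List Char),
    topCommaAux l i d = (j : Int) →
    (j - i < l.length ∧ l[j - i]? = some ',' ∧
      (l.take (j - i)).foldl aStep (args, kw, buf, d) = (args, kw, buf ++ l.take (j - i), 0)) := by
  induction l with
  | nil => intro i j d args kw buf h; exact absurd h (by simp [topCommaAux])
  | cons c cs ih =>
    intro i j d args kw buf h
    simp only [topCommaAux] at h
    split_ifs at h with h1 h2 h3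
    · have hb := topCommaAux_cases cs (i + 1) (d + 1)
      rcases hb with hb | ⟨j', hj', hle, _⟩
      · rw [hb] at h; exact absurd h (by intro h; omega)
      · rw [hj'] at h
        have hjj : j' = j := by exact_mod_cast h
        rw [hjj] at hj' hle
        obtain ⟨hl, hg, hf⟩ := ih (i + 1) j (d + 1) args kw (buf ++ [c]) hj'
        have hsub : j - i = (j - (i + 1)) + 1 := by omega
        refine ⟨by simp; omega, ?_, ?_⟩
        · rw [hsub]; simpa using hg
        · rw [hsub]
          simp only [List.take_succ_cons, List.foldl_cons]
          have hstep : aStep (args, kw, buf, d) c = (args, kw, buf ++ [c], d + 1) := by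
            simp [aStep, h1]
          rw [hstep, hf]
          simp [List.append_assoc]
    · have hb := topCommaAux_cases cs (i + 1) (d - 1)
      rcases hb with hb | ⟨j', hj', hle, _⟩
      · rw [hb] at h; exact absurd h (by intro h; omega)
      · rw [hj'] at h
        have hjj : j' = j := by exact_mod_cast h
        rw [hjj] at hj' hle
        obtain ⟨hl, hg, hf⟩ := ih (i + 1) j (d - 1) args kw (buf ++ [c]) hj'
        have hsub : j - i = (j - (i + 1)) + 1 := by omega
        refine ⟨by simp; omega, ?_, ?_⟩
        · rw [hsub]; simpa using hg
        · rw [hsub]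
          simp only [List.take_succ_cons, List.foldl_cons]
          have hstep : aStep (args, kw, buf, d) c = (args, kw, buf ++ [c], d - 1) := by
            simp [aStep, h1, h2]
          rw [hstep, hf]
          simp [List.append_assoc]
    · have hji : j = i := by exact_mod_cast h.symm
      subst hji
      refine ⟨by simp, by simp [h3.1], ?_⟩
      simp [h3.2]
    · have hb := topCommaAux_cases cs (i + 1) d
      rcases hb with hb | ⟨j', hj', hle, _⟩
      · rw [hb] at h; exact absurd h (by intro h; omega)
      · rw [hj'] at h
        have hjj : j' = j := by exact_mod_cast h
        rw [hjj] at hj' hle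
        obtain ⟨hl, hg, hf⟩ := ih (i + 1) j d args kw (buf ++ [c]) hj'
        have hsub : j - i = (j - (i + 1)) + 1 := by omega
        refine ⟨by simp; omega, ?_, ?_⟩
        · rw [hsub]; simpa using hg
        · rw [hsub]
          simp only [List.take_succ_cons, List.foldl_cons]
          have hstep : aStep (args, kw, buf, d) c = (args, kw, buf ++ [c], d) := by
            simp [aStep, h1, h2, h3]
          rw [hstep, hf]
          simp [List.append_assoc]

-- main invariant: A's fold over the remainder equals B's find-and-slice loop
theorem main_inv (m : Nat) : ∀ (s : List Char) (start : Nat)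
    (args : List String) (kw : PySem.Dict String String),
    (s.drop start).length ≤ m →
    (((s.drop start).foldl aStep (args, kw, [], 0)).1,
     ((s.drop start).foldl aStep (args, kw, [], 0)).2.1) = bLoop s args kw start := by
  induction m with
  | zero =>
    intro s start args kw hm
    have hl : s.drop start = [] := List.eq_nil_of_length_eq_zero (by omega)
    rw [bLoop]
    have hi : topComma s start = -1 := by
      unfold topComma; rw [hl]; rfl
    simp [hi, hl]
  | succ m ih =>
    intro s start args kw hm
    rw [bLoop]
    by_cases hlt : topComma s start < 0
    · rcases topCommaAux_cases (s.drop start) start 0 with hc | ⟨j, hj, _, _⟩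
      · obtain ⟨d', hf⟩ := fold_noComma (s.drop start) start 0 args kw [] hc
        simp [hlt, hf]
      · exfalso; unfold topComma at hlt; rw [hj] at hlt; omega
    · rcases topCommaAux_cases (s.drop start) start 0 with hc | ⟨j, hj, hle, hlen⟩
      · exfalso; unfold topComma at hlt; rw [hc] at hlt; omega
      · have hn : (topComma s start).toNat = j := by unfold topComma; rw [hj]; simp
        obtain ⟨hjl, hget, hf⟩ := fold_toComma (s.drop start) start j 0 args kw [] hj
        set l := s.drop start with hldef
        -- decompose l = take (j-start) ++ ',' :: drop (j-start+1)
        have hdecomp : l = l.take (j - start) ++ ',' :: l.drop (j - start + 1) := by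
          have := List.getElem?_eq_some_iff.mp hget
          obtain ⟨hlt', hval⟩ := this
          conv_lhs => rw [← List.take_append_drop (j - start) l]
          congr 1
          rw [List.drop_eq_getElem_cons hlt']
          simp [hval]
        -- A side: fold over prefix, then the comma step, then the rest
        have hstepc : aStep (args, kw, l.take (j - start), 0) ',' =
            (let part := PySem.Chars.strip (l.take (j - start))
             if PySem.Chars.isIn ['='] part then
               let (k, v) := pvKV part
               (args, kw.insert k v, ([] : List Char), (0 : Int))
             else if part ≠ [] then (args ++ [String.ofList part], kw, ([] : List Char), (0 : Int))
             else (args, kw, ([] : List Char), (0 : Int))) := by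
          simp only [aStep]
          norm_num
          rw [if_neg (by decide), if_neg (by decide)]
        have hpart : (s.take j).drop start = l.take (j - start) := by
          rw [hldef, List.drop_take]
        have hrest : l.drop (j - start + 1) = s.drop (j + 1) := by
          rw [hldef, List.drop_drop]
          congr 1
          omega
        have hrlen : (s.drop (j + 1)).length ≤ m := by
          have h1 : l.length = s.length - start := by rw [hldef]; simp
          have h2 : (s.drop (j + 1)).length = s.length - (j + 1) := by simp
          omega
        -- put it together
        rw [dif_neg hlt]
        simp only [hn, hpart]
        conv_lhs => rw [hdecomp]
        rw [List.foldl_append, hf]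
        simp only [List.foldl_cons, List.nil_append]
        rw [hstepc]
        by_cases hin : PySem.Chars.isIn ['='] (PySem.Chars.strip (l.take (j - start))) = true
        · simp only [hin, if_true]
          rw [hrest] at *
          have := ih s (j + 1) args (kw.insert (pvKV (PySem.Chars.strip (l.take (j - start)))).1
            (pvKV (PySem.Chars.strip (l.take (j - start)))).2) hrlen
          simpa using this
        · simp only [Bool.not_eq_true] at hin
          by_cases hne : PySem.Chars.strip (l.take (j - start)) = []
          · rw [hrest] at *
            simpa [hin, hne] using ih s (j + 1) args kw hrlen
          · rw [hrest] at *
            simpa [hin, hne] using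
              ih s (j + 1) (args ++ [String.ofList (PySem.Chars.strip (l.take (j - start)))]) kw hrlen

-- ===== VERDICT (by name: the statement is the Claim_ definition above) =====
theorem parse_macro_args_spec : Claim_equal_parse_macro_args := by
  intro s _
  unfold Spec_parse_macro_args parse_macro_args parse_macro_args_alt
  have h := main_inv (s.toList ++ [',']).length (s.toList ++ [',']) 0 [] PySem.Dict.empty
    (by simp)
  simp only [List.drop_zero] at h
  rcases hp : List.foldl aStep ([], PySem.Dict.empty, [], 0) (s.toList ++ [',']) with ⟨a, k, b, d⟩
  rcases hq : bLoop (s.toList ++ [',']) [] PySem.Dict.empty 0 with ⟨a', k'⟩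
  rw [hp, hq] at h
  simp only [Prod.mk.injEq] at h
  simp [hq, h.1, h.2]
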